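-- pv_equiv track=rewrite | github.com/melibyte/python_playground | Calculator/calculator.py | calc_fact
-- ===== SOURCE A (Python) =====
-- def calc_fact(n):
--     if n.isdigit() == False:
--         return -1
--     n = int(n)
--
--     number = 1
--     for  i in range(1,n+1):
--         number *= i
--     return number
-- ===== SOURCE B (Python) =====
-- def calc_fact(n):
--     if not n.isdigit():
--         return -1
--     n = int(n)
--     return _prod_range(1, n)
--
--
-- def _prod_range(lo, hi):
--     # product of the integers lo..hi inclusive, by divide and conquer
--     if lo > hi:
--         return 1
--     if lo == hi:
--         return lo
--     mid = (lo + hi) // 2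
--     return _prod_range(lo, mid) * _prod_range(mid + 1, hi)
-- ===== Notes on version B (the rewrite author's own statement) =====
-- stated objective: alternative
-- what changed: The linear accumulation loop over range(1, n+1) is replaced by a divide-and-conquer product of the interval [1, n] that splits at the midpoint and multiplies the two halves (balanced operand sizes for big-int multiplication); validation is unchanged.
import Mathlib
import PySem

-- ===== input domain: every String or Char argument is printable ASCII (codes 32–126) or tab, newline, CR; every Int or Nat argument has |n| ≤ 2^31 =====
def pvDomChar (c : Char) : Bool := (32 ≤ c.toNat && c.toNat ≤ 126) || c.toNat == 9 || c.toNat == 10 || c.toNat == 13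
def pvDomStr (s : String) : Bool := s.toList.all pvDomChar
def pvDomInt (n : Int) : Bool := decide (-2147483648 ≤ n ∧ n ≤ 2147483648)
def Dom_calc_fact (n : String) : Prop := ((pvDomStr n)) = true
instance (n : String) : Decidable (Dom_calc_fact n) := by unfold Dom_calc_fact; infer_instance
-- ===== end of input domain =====

-- B replaces the linear accumulation loop with a divide-and-conquer interval product (alternative decomposition; same validation).

-- ===== PORT A =====
-- int(n) is guarded by n.isdigit(), so PySem.Int.ofStr? is always `some` where it is read; .getD 0 is unreachable otherwise.
def calc_fact (n : String) : Int :=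
  if PySem.Str.strIsdigit n = false then -1
  else
    let m : Int := (PySem.Int.ofStr? n).getD 0
    (PySem.List.pyRange 1 (m + 1) 1).foldl (fun number i => number * i) 1

-- ===== PORT B =====
-- product of the integers lo..hi inclusive, by divide and conquer (B's _prod_range)
def prodRangeDC (lo hi : Int) : Int :=
  if lo > hi then 1
  else if lo = hi then lo
  else
    let mid := PySem.Int.floordiv (lo + hi) 2
    prodRangeDC lo mid * prodRangeDC (mid + 1) hi
termination_by (hi - lo).toNat
decreasing_by
  · have := PySem.Int.floordiv_two_mid_bounds (lo := lo) (hi := hi) (by omega)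
    have h2 : PySem.Int.floordiv (lo + hi) 2 = (lo + hi) / 2 :=
      PySem.Int.floordiv_eq_ediv_of_pos (by omega)
    omega
  · have h2 : PySem.Int.floordiv (lo + hi) 2 = (lo + hi) / 2 :=
      PySem.Int.floordiv_eq_ediv_of_pos (by omega)
    omega

def calc_fact_alt (n : String) : Int :=
  if PySem.Str.strIsdigit n = false then -1
  else prodRangeDC 1 ((PySem.Int.ofStr? n).getD 0)

-- ===== PRECONDITION & SPEC =====
def Spec_calc_fact (n : String) (out : Int) : Prop := out = calc_fact_alt n
instance (n : String) (out : Int) : Decidable (Spec_calc_fact n out) := by unfold Spec_calc_fact; infer_instance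

-- ===== CLAIM (what is proved, stated in full; the proofs are below) =====
def Claim_equal_calc_fact : Prop := ∀ (n : String), Dom_calc_fact n → Spec_calc_fact n (calc_fact n)

-- ===== LEMMAS AND PROOFS =====

-- the divide-and-conquer product equals the product of the range lo..hi
theorem prodRangeDC_eq_prod (lo hi : Int) :
    prodRangeDC lo hi = (PySem.List.pyRange lo (hi + 1) 1).prod := by
  induction lo, hi using prodRangeDC.induct with
  | case1 lo hi h =>
    rw [prodRangeDC, if_pos h, PySem.List.pyRange_one_eq_nil (by omega), List.prod_nil]
  | case2 lo h =>
    rw [prodRangeDC, if_neg h, if_pos rfl,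
      PySem.List.pyRange_one_cons (by omega), PySem.List.pyRange_one_eq_nil (by omega)]
    simp
  | case3 lo hi hgt hne mid ih1 ih2 =>
    have hmid := PySem.Int.floordiv_two_mid_bounds (lo := lo) (hi := hi) (by omega)
    have hm : mid = PySem.Int.floordiv (lo + hi) 2 := rfl
    rw [prodRangeDC, if_neg hgt, if_neg hne,
      PySem.List.pyRange_one_append lo (mid + 1) (hi + 1) (by omega) (by omega),
      List.prod_append, ← ih1, ← ih2]

theorem calc_fact_spec : Claim_equal_calc_fact := by
  intro n _
  unfold Spec_calc_fact calc_fact calc_fact_alt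
  split_ifs with h
  · rfl
  · rw [prodRangeDC_eq_prod, List.prod_eq_foldl]
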